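-- pv_equiv track=rewrite | github.com/stammelleo/Web_Crawler | info_gatherer.py | carrot_text_filter
-- ===== SOURCE A (Python) =====
-- def string_to_list_convert(text):
--     '''Converts string parameter to a list'''
--     # Converts given string to list and returns list
--     temp_string = []
--     for character in text:
--         temp_string.append(character)
--     return temp_string
--
-- def list_to_string_convert(bucket):
--     '''Converts a list parameter to a string'''
--     r_string = ''
--     # iterate through given list adding to string
--     for item in bucket:
--         r_string += item
--     return r_string
--
-- def carrot_text_filter(text):
--     '''Filters out junk in text between <...> strings'''
--     index = 0
--     # Create temporary list with chars to get rid of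
--     temp = string_to_list_convert(text)
--     start_range = 0
--     # iterate through string removing non text
--     for char in text:
--         if char == '<' and start_range == 0:
--             start_range = index
--         elif char == '>' and start_range != 0:
--             # Deleting <...> from strings
--             del (temp[start_range: index + 1])
--
--             # Recalculating index based on new length of set
--             index = index - ((index + 1) - start_range)
--             start_range = 0
--         index += 1
--
--
--
--     return list_to_string_convert(temp)
-- ===== SOURCE B (Python) =====
-- def carrot_text_filter(text):
--     '''Filters out junk in text between <...> strings'''
--     # Single pass: characters outside tags are collected in `out`; characters of
--     # an open tag are buffered and dropped when the tag closes.  An unclosed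
--     # trailing tag is not a complete <...> segment, so its characters are kept.
--     out = []
--     buf = []
--     inside = False
--     for c in text:
--         if inside:
--             if c == '>':
--                 buf = []
--                 inside = False
--             else:
--                 buf.append(c)
--         elif c == '<':
--             inside = True
--             buf = ['<']
--         else:
--             out.append(c)
--     return ''.join(out) + ''.join(buf)
-- ===== Notes on version B (the rewrite author's own statement) =====
-- stated objective: faster
-- what changed: Replaced A's delete-slices-from-a-shared-list-with-index-rebasing scan (each del copies the list) by a single pass that appends kept characters to an output list and buffers in-tag characters, discarding them when the tag closes.
-- intended difference: On texts whose first character is '<' and which contain a later '>', A's start_range==0 sentinel cannot register a tag opening at index 0, so A keeps that leading tag (A('<a>') = '<a>'), while B removes it (B('<a>') = ''), which is the intended filtering of <...> segments. — e.g. on carrot_text_filter("<a>"): A returns "<a>", B returns ""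
import Mathlib
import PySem

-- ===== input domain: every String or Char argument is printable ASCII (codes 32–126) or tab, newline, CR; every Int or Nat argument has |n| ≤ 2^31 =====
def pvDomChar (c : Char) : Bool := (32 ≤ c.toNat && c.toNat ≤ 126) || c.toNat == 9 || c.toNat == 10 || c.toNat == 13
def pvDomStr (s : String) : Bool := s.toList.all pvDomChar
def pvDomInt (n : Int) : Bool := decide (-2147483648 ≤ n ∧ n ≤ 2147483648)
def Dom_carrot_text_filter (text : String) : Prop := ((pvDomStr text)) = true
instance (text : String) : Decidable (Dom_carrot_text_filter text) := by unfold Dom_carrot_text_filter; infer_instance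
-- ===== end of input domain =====

-- B replaces A's quadratic delete-from-a-shared-list scan by a single pass with
-- an inside-tag buffer (objective: faster); on texts starting with '<' that
-- contain a later '>' the two differ as stated in D_ below.

-- ===== PORT A =====
-- '''Converts string parameter to a list'''
def string_to_list_convert (text : String) : List Char :=
  text.toList.foldl (fun temp_string character => temp_string ++ [character]) []

-- '''Converts a list parameter to a string'''
def list_to_string_convert (bucket : List Char) : String :=
  bucket.foldl (fun r_string item => r_string.push item) ""

-- the 'for char in text' loop of A, state = (index, temp, start_range).
-- del temp[start_range : index+1] is ported via take/drop: in every reachable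
-- state 0 ≤ start_range ≤ index + 1 ≤ len temp, where Python's del-slice and
-- take/drop agree exactly.
def carrotLoopA : List Char → Int → List Char → Int → List Char
  | [], _, temp, _ => temp
  | char :: rest, index, temp, start_range =>
    if char = '<' ∧ start_range = 0 then
      carrotLoopA rest (index + 1) temp index
    else if char = '>' ∧ start_range ≠ 0 then
      let temp' := temp.take start_range.toNat ++ temp.drop (index + 1).toNat
      let index' := index - ((index + 1) - start_range)
      carrotLoopA rest (index' + 1) temp' 0
    else
      carrotLoopA rest (index + 1) temp start_range

def carrot_text_filter (text : String) : String :=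
  list_to_string_convert (carrotLoopA text.toList 0 (string_to_list_convert text) 0)

-- ===== PORT B =====
-- the single-pass loop of Source B, state = (out, buf, inside)
def carrotLoopB : List Char → List Char → List Char → Bool → List Char × List Char
  | [], out, buf, _ => (out, buf)
  | c :: rest, out, buf, inside =>
    if inside then
      if c = '>' then carrotLoopB rest out [] false
      else carrotLoopB rest out (buf ++ [c]) true
    else if c = '<' then carrotLoopB rest out ['<'] true
    else carrotLoopB rest (out ++ [c]) buf false

def carrot_text_filter_alt (text : String) : String :=
  let p := carrotLoopB text.toList [] [] false
  String.ofList p.1 ++ String.ofList p.2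

-- ===== PRECONDITION & SPEC =====
-- On texts whose first character is '<' and which contain a later '>', A's
-- start_range==0 sentinel cannot register a tag opening at index 0, so A keeps
-- that leading tag ("<a>" -> "<a>") while B removes it ("<a>" -> ""), which is
-- the intended filtering of <...> segments.
def D_carrot_text_filter (text : String) : Prop :=
  text.toList.head? = some '<' ∧ '>' ∈ text.toList.drop 1
instance (text : String) : Decidable (D_carrot_text_filter text) := by
  unfold D_carrot_text_filter; infer_instance

def Spec_carrot_text_filter (text : String) (out : String) : Prop :=
  ¬ D_carrot_text_filter text → out = carrot_text_filter_alt text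
instance (text : String) (out : String) : Decidable (Spec_carrot_text_filter text out) := by unfold Spec_carrot_text_filter; infer_instance

def pvDiffWitness_carrot_text_filter : String := "<a>"
def pvDiffWitnessOut_carrot_text_filter : String × String := ("<a>", "")

-- ===== CLAIM (what is proved, stated in full; the proofs are below) =====
def Claim_unchanged_carrot_text_filter : Prop := ∀ (text : String), Dom_carrot_text_filter text → Spec_carrot_text_filter text (carrot_text_filter text)
def Claim_changed_carrot_text_filter : Prop := Dom_carrot_text_filter (pvDiffWitness_carrot_text_filter) ∧ D_carrot_text_filter (pvDiffWitness_carrot_text_filter) ∧ carrot_text_filter (pvDiffWitness_carrot_text_filter) = pvDiffWitnessOut_carrot_text_filter.1 ∧ carrot_text_filter_alt (pvDiffWitness_carrot_text_filter) = pvDiffWitnessOut_carrot_text_filter.2 ∧ pvDiffWitnessOut_carrot_text_filter.1 ≠ pvDiffWitnessOut_carrot_text_filter.2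

-- ===== LEMMAS AND PROOFS =====

lemma string_to_list_convert_eq (text : String) : string_to_list_convert text = text.toList := by
  unfold string_to_list_convert
  rw [PySem.List.foldl_append_singleton_eq_map]
  simp

lemma list_to_string_convert_eq (l : List Char) : list_to_string_convert l = String.ofList l := by
  unfold list_to_string_convert
  induction l using List.reverseRecOn with
  | nil => rfl
  | append_singleton xs x ih =>
      rw [List.foldl_append, List.foldl_cons, List.foldl_nil, ih]
      apply String.ext
      simp [String.toList_push]

-- A never deletes anything when no '>' remains
lemma carrotLoopA_no_gt : ∀ (cs : List Char) (idx : Int) (temp : List Char) (sr : Int),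
    '>' ∉ cs → carrotLoopA cs idx temp sr = temp := by
  intro cs
  induction cs with
  | nil => intro idx temp sr _; rfl
  | cons c rest ih =>
      intro idx temp sr h
      have hc : c ≠ '>' := fun hh => h (hh ▸ List.mem_cons_self)
      have hr : '>' ∉ rest := fun hh => h (List.mem_cons_of_mem _ hh)
      simp only [carrotLoopA]
      split_ifs with h1 h2
      · exact ih _ _ _ hr
      · exact absurd h2.1 hc
      · exact ih _ _ _ hr

-- B, inside an open tag with no '>' remaining, buffers everything
lemma carrotLoopB_no_gt : ∀ (cs out buf : List Char),
    '>' ∉ cs → carrotLoopB cs out buf true = (out, buf ++ cs) := by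
  intro cs
  induction cs with
  | nil => intro out buf _; simp [carrotLoopB]
  | cons c rest ih =>
      intro out buf h
      have hc : c ≠ '>' := fun hh => h (hh ▸ List.mem_cons_self)
      have hr : '>' ∉ rest := fun hh => h (List.mem_cons_of_mem _ hh)
      simp [carrotLoopB, hc, ih _ _ hr]

-- the loop invariant: once the first character has been consumed and `out` is
-- nonempty, A's state (index, temp, start_range) is determined by B's state
-- (out, buf, inside) and the unprocessed suffix cs.
lemma carrotLoop_key : ∀ (cs out buf : List Char) (inside : Bool) (idx sr : Int),
    idx = (out.length : Int) + (buf.length : Int) →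
    sr = (if inside then (out.length : Int) else 0) →
    out ≠ [] → (inside = false → buf = []) →
    carrotLoopA cs idx (out ++ buf ++ cs) sr
      = (carrotLoopB cs out buf inside).1 ++ (carrotLoopB cs out buf inside).2 := by
  intro cs
  induction cs with
  | nil =>
      intro out buf inside idx sr hidx hsr h1 h2
      cases inside with
      | false => simp [carrotLoopA, carrotLoopB, h2 rfl]
      | true => simp [carrotLoopA, carrotLoopB]
  | cons c rest ih =>
      intro out buf inside idx sr hidx hsr h1 h2
      cases inside with
      | false =>
        have hbuf : buf = [] := h2 rfl
        subst hbuf hidx hsr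
        by_cases hc : c = '<'
        · subst hc
          -- '<' outside: opens a tag
          simp only [carrotLoopA, carrotLoopB]
          norm_num
          have := ih out ['<'] true ((out.length : Int) + 1) (out.length : Int)
            (by simp only [List.length_cons, List.length_nil]; push_cast; ring)
            (by norm_num) h1 (by simp)
          simpa using this
        · -- ordinary char (or '>') while closed: appended
          simp only [carrotLoopA, carrotLoopB]
          norm_num [hc]
          have := ih (out ++ [c]) [] false ((out.length : Int) + 1) 0
            (by simp only [List.length_append, List.length_cons, List.length_nil]; push_cast; ring)
            (by norm_num) (by simp) (fun _ => rfl)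
          simpa using this
      | true =>
        subst hidx hsr
        by_cases hc : c = '>'
        · subst hc
          -- closing '>': A deletes temp[start_range : index+1], B drops buf
          have hsr0 : (out.length : Int) ≠ 0 := by
            simpa using fun h => h1 (List.length_eq_zero_iff.mp h)
          simp only [carrotLoopA, carrotLoopB, if_true, true_and]
          rw [if_pos hsr0]
          norm_num
          have hdrop : ((out.length : Int) + (buf.length : Int) + 1).toNat
              = out.length + (buf.length + 1) := by omega
          rw [hdrop, List.drop_length_add_append]
          have hdr : List.drop (buf.length + 1) (buf ++ '>' :: rest) = rest := by
            have h1 : buf.length + 1 = (buf ++ ['>']).length := by simp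
            have h2 : buf ++ '>' :: rest = (buf ++ ['>']) ++ rest := by simp
            rw [h1, h2, List.drop_left]
          rw [hdr]
          have hidx2 : (out.length : Int) + (buf.length : Int)
              - ((out.length : Int) + (buf.length : Int) + 1 - (out.length : Int)) + 1
              = (out.length : Int) := by ring
          rw [hidx2]
          have := ih out [] false (out.length : Int) 0 (by norm_num) (by norm_num)
            h1 (fun _ => rfl)
          simpa using this
        · -- char inside an open tag: buffered by B, skipped by A
          have hsr0 : (out.length : Int) ≠ 0 := by
            simpa using fun h => h1 (List.length_eq_zero_iff.mp h)
          simp only [carrotLoopA, carrotLoopB, if_true]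
          rw [if_neg (by rintro ⟨-, h⟩; exact hsr0 h)]
          rw [if_neg (by rintro ⟨h, -⟩; exact hc h)]
          norm_num [hc]
          have := ih out (buf ++ [c]) true ((out.length : Int) + (buf.length : Int) + 1)
            (out.length : Int)
            (by simp only [List.length_append, List.length_cons, List.length_nil]; push_cast; ring)
            (by norm_num) h1 (by simp)
          simpa using this

-- ===== VERDICT (by name: the statements are the Claim_ definitions above) =====
theorem carrot_text_filter_spec : Claim_unchanged_carrot_text_filter := by
  intro text _ hnd
  unfold carrot_text_filter carrot_text_filter_alt
  rw [string_to_list_convert_eq]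
  cases htl : text.toList with
  | nil => simp [carrotLoopA, carrotLoopB, list_to_string_convert_eq]
  | cons c rest =>
    by_cases hc : c = '<'
    · -- leading '<': ¬D_ forces '>' ∉ rest, so A keeps everything and B buffers everything
      subst hc
      have hng : '>' ∉ rest := by
        intro hmem
        exact hnd ⟨by rw [htl]; rfl, by rw [htl]; simpa using hmem⟩
      have hA : carrotLoopA ('<' :: rest) 0 ('<' :: rest) 0 = '<' :: rest := by
        apply carrotLoopA_no_gt
        intro hmem
        rcases List.mem_cons.mp hmem with h | h
        · exact absurd h (by decide)
        · exact hng h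
      have hB : carrotLoopB ('<' :: rest) [] [] false = ([], '<' :: rest) := by
        simp [carrotLoopB, carrotLoopB_no_gt rest [] ['<'] hng]
      rw [hA, hB, list_to_string_convert_eq]
      apply String.ext
      simp
    · -- first char is not '<': both machines append it and the invariant takes over
      have hstep : carrotLoopA (c :: rest) 0 (c :: rest) 0
          = carrotLoopA rest 1 (c :: rest) 0 := by
        simp only [carrotLoopA]
        rw [if_neg (by rintro ⟨h, -⟩; exact hc h)]
        rw [if_neg (by rintro ⟨-, h⟩; exact h rfl)]
        norm_num
      have hstepB : carrotLoopB (c :: rest) [] [] false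
          = carrotLoopB rest [c] [] false := by
        simp [carrotLoopB, hc]
      rw [hstep, hstepB]
      have := carrotLoop_key rest [c] [] false 1 0 (by norm_num) (by norm_num)
        (by simp) (fun _ => rfl)
      rw [show c :: rest = [c] ++ [] ++ rest by simp, this, list_to_string_convert_eq]
      apply String.ext
      simp [String.toList_append]

theorem carrot_text_filter_changed : Claim_changed_carrot_text_filter := by
  unfold Claim_changed_carrot_text_filter; decide
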